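-- pv_equiv track=rewrite | github.com/LennartGr/Differential-Drive-Robot-with-Pygame | arrayUtils.py | detectDoor
-- ===== SOURCE A (Python) =====
-- def detectDoor(dropIndexList, increaseIndexList, minRequiredGap, rotationSteps):
--     # special case checked first: do we start by looking at the center of the door?
--     # only the very last drop index is a candidate with the very first increase index
--     singleDropIndex = len(dropIndexList) == 1
--     dropIndex = dropIndexList[-1]
--     increaseIndex = increaseIndexList[0]
--     # condition:
--     # 1. really this case
--     # 2. gap is respected
--     # 3. no other drop index in between
--     if (dropIndex > increaseIndex) and ((dropIndex - rotationSteps + minRequiredGap) <= increaseIndex) and (singleDropIndex or (increaseIndex < dropIndexList[0])):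
--         return (True, dropIndex, increaseIndex)
--     # regular case : we do not start by looking at the door
--     # thus increaseIndex < dropIndex
--     for i in range(len(dropIndexList)):
--         dropIndex = dropIndexList[i]
--         for increaseIndex in increaseIndexList:
--             # found the first bigger increase index
--             if dropIndex <= increaseIndex:
--                 # check if the gap is big enough and that there is no other drop index in between
--                 # TODO check that there is no other drop index in between (special case only one dropIndex)
--                 # if dropIndex + minRequiredGap <= increaseIndex and increaseIndex < dropIndexList[i + 1]:
--                 # condition: 1. gap is respected, 2. no other drop index in between
--                 if dropIndex + minRequiredGap <= increaseIndex:
--                     # check no drop index in between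
--                     if (i < (len(dropIndexList) - 1)) and (increaseIndex < dropIndexList[i + 1]):
--                         return (True, dropIndex, increaseIndex)
--                     elif i == (len(dropIndexList) -1):
--                         # very last drop index
--                         return (True, dropIndex, increaseIndex)
--                 break
--     # nothing found
--     return (False, 0, 0)
-- ===== SOURCE B (Python) =====
-- def detectDoor(dropIndexList, increaseIndexList, minRequiredGap, rotationSteps):
--     # faster: one sorted-merge sweep precomputes, for every distinct drop value,
--     # the first increase value >= it; the quadratic inner rescan of A disappears.
--     lastDrop = dropIndexList[-1]
--     firstInc = increaseIndexList[0]
--     if lastDrop > firstInc and lastDrop - rotationSteps + minRequiredGap <= firstInc \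
--             and (len(dropIndexList) == 1 or firstInc < dropIndexList[0]):
--         return (True, lastDrop, firstInc)
--     stack = sorted(set(dropIndexList), reverse=True)  # smallest threshold on top
--     firstGE = {}
--     for e in increaseIndexList:
--         if not stack:
--             break
--         while stack and stack[-1] <= e:
--             firstGE[stack.pop()] = e
--     n = len(dropIndexList)
--     for i, d in enumerate(dropIndexList):
--         if d in firstGE:
--             e = firstGE[d]
--             if d + minRequiredGap <= e and (i == n - 1 or e < dropIndexList[i + 1]):
--                 return (True, d, e)
--     return (False, 0, 0)
-- ===== Notes on version B (the rewrite author's own statement) =====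
-- stated objective: faster
-- what changed: A rescans increaseIndexList from the start for every drop index (O(n*m)); B sorts the distinct drop values once and does a single merge-style sweep over increaseIndexList that precomputes, for each drop value, the first increase value >= it, then decides in one pass over the drop list.
import Mathlib
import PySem

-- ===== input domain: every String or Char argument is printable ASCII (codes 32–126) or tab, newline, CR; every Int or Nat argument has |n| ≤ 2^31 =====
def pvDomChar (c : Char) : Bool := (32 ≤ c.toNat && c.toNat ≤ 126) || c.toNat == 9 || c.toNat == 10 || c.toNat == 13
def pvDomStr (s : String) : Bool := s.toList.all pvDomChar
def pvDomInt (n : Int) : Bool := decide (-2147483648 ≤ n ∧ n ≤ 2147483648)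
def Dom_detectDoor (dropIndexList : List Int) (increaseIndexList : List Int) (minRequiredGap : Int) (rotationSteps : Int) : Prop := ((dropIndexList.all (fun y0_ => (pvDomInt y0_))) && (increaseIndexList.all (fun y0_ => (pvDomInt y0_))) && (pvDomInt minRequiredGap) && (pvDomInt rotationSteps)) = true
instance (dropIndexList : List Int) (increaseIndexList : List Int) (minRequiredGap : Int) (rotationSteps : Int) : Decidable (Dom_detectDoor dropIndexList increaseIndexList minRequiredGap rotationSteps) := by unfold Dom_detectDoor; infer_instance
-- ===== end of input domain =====

-- B replaces A's quadratic per-drop rescan of increaseIndexList by one sorted-merge sweep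
-- that precomputes, for every distinct drop value, the first increase value ≥ it (measured faster).


-- ===== PORT A =====
-- inner 'for increaseIndex in increaseIndexList' loop; 'break' / falling out both yield none.
-- dropIndexList[i+1] is read only under the guard i < len-1, so List.getD is exact there.
def pvInnerA (drops : List Int) (i : Nat) (dropIndex minRequiredGap : Int) : List Int → Option (Bool × Int × Int)
  | [] => none
  | e :: rest =>
    if dropIndex ≤ e then
      (if dropIndex + minRequiredGap ≤ e then
        if i < drops.length - 1 ∧ e < drops.getD (i + 1) 0 then some (true, dropIndex, e)
        else if i = drops.length - 1 then some (true, dropIndex, e)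
        else none
      else none)
    else pvInnerA drops i dropIndex minRequiredGap rest

-- outer 'for i in range(len(dropIndexList))' loop; dropIndexList[i] is in range for i ∈ range(len).
def pvOuterA (drops incs : List Int) (minRequiredGap : Int) : List Nat → Bool × Int × Int
  | [] => (false, 0, 0)
  | i :: rest =>
    match pvInnerA drops i (drops.getD i 0) minRequiredGap incs with
    | some r => r
    | none => pvOuterA drops incs minRequiredGap rest

def detectDoor (dropIndexList : List Int) (increaseIndexList : List Int) (minRequiredGap : Int) (rotationSteps : Int) : Bool × Int × Int :=
  match PySem.List.pyGet? dropIndexList (-1), PySem.List.pyGet? increaseIndexList 0 with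
  | some dropIndex, some increaseIndex =>
    -- 'singleDropIndex or increaseIndex < dropIndexList[0]' (list nonempty here, getD exact)
    if dropIndex > increaseIndex ∧ dropIndex - rotationSteps + minRequiredGap ≤ increaseIndex ∧
        (dropIndexList.length = 1 ∨ increaseIndex < dropIndexList.getD 0 0) then
      (true, dropIndex, increaseIndex)
    else
      pvOuterA dropIndexList increaseIndexList minRequiredGap (List.range dropIndexList.length)
  | _, _ => (false, 0, 0)   -- Python raises IndexError on an empty list; excluded by Pre_

-- ===== PORT B =====
-- Source B's descending 'stack' popped from its END is modeled top-first: this list is the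
-- stack read from its top (smallest element), i.e. the ascending sorted list, consumed head-first.
def pvAbsorbB (e : Int) (fge : PySem.Dict Int Int) : List Int → List Int × PySem.Dict Int Int
  | [] => ([], fge)
  | t :: ts => if t ≤ e then pvAbsorbB e (fge.insert t e) ts else (t :: ts, fge)

-- 'for e in increaseIndexList' with the early break once the stack is empty
def pvSweepB : List Int → PySem.Dict Int Int → List Int → PySem.Dict Int Int
  | _, fge, [] => fge
  | remaining, fge, e :: rest =>
    if remaining = [] then fge
    else pvSweepB (pvAbsorbB e fge remaining).1 (pvAbsorbB e fge remaining).2 rest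

-- 'for i, d in enumerate(dropIndexList)'; indices are the nonnegative enumerate indices,
-- and dropIndexList[i+1] is read only when i ≠ len-1, so getD is exact there.
def pvScanB : List Int → Int → PySem.Dict Int Int → List (Int × Int) → Bool × Int × Int
  | _, _, _, [] => (false, 0, 0)
  | drops, gap, fge, (i, d) :: rest =>
    match fge.get? d with
    | some e =>
      if d + gap ≤ e ∧ (i = (drops.length : Int) - 1 ∨ e < drops.getD (i + 1).toNat 0) then
        (true, d, e)
      else pvScanB drops gap fge rest
    | none => pvScanB drops gap fge rest

def detectDoor_alt (dropIndexList : List Int) (increaseIndexList : List Int) (minRequiredGap : Int) (rotationSteps : Int) : Bool × Int × Int :=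
  match PySem.List.pyGet? dropIndexList (-1) with
  | none => (false, 0, 0)   -- Python raises IndexError on an empty list; excluded by Pre_
  | some lastDrop =>
  match PySem.List.pyGet? increaseIndexList 0 with
  | none => (false, 0, 0)
  | some firstInc =>
    if lastDrop > firstInc ∧ lastDrop - rotationSteps + minRequiredGap ≤ firstInc ∧
        (dropIndexList.length = 1 ∨ firstInc < dropIndexList.getD 0 0) then
      (true, lastDrop, firstInc)
    else
      -- sorted(set(dropIndexList), reverse=True) as a stack = the ascending sorted list head-first
      let thresholds := PySem.List.sorted (PySem.Set.ofList dropIndexList) (fun x => x) false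
      let fge := pvSweepB thresholds PySem.Dict.empty increaseIndexList
      pvScanB dropIndexList minRequiredGap fge (PySem.List.enumerate dropIndexList 0)

-- ===== PRECONDITION & SPEC =====
-- Pre_ excludes exactly the inputs where Python A raises IndexError: an empty list
-- (dropIndexList[-1] / increaseIndexList[0]).
def Pre_detectDoor (dropIndexList : List Int) (increaseIndexList : List Int) (minRequiredGap : Int) (rotationSteps : Int) : Prop :=
  dropIndexList ≠ [] ∧ increaseIndexList ≠ []
instance (dropIndexList : List Int) (increaseIndexList : List Int) (minRequiredGap : Int) (rotationSteps : Int) : Decidable (Pre_detectDoor dropIndexList increaseIndexList minRequiredGap rotationSteps) := by unfold Pre_detectDoor; infer_instance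
def pvWitness_detectDoor : List Int × List Int × Int × Int := ([2, 5], [3, 9], 1, 0)

def Spec_detectDoor (dropIndexList : List Int) (increaseIndexList : List Int) (minRequiredGap : Int) (rotationSteps : Int) (out : Bool × Int × Int) : Prop := out = detectDoor_alt dropIndexList increaseIndexList minRequiredGap rotationSteps
instance (dropIndexList : List Int) (increaseIndexList : List Int) (minRequiredGap : Int) (rotationSteps : Int) (out : Bool × Int × Int) : Decidable (Spec_detectDoor dropIndexList increaseIndexList minRequiredGap rotationSteps out) := by unfold Spec_detectDoor; infer_instance

-- ===== CLAIM (what is proved, stated in full; the proofs are below) =====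
def Claim_equal_detectDoor : Prop := ∀ (dropIndexList : List Int) (increaseIndexList : List Int) (minRequiredGap : Int) (rotationSteps : Int), Dom_detectDoor dropIndexList increaseIndexList minRequiredGap rotationSteps → Pre_detectDoor dropIndexList increaseIndexList minRequiredGap rotationSteps → Spec_detectDoor dropIndexList increaseIndexList minRequiredGap rotationSteps (detectDoor dropIndexList increaseIndexList minRequiredGap rotationSteps)

-- ===== LEMMAS AND PROOFS =====

-- the decision A takes at the first increase value e with d ≤ e
def pvDecA (drops : List Int) (i : Nat) (d gap e : Int) : Option (Bool × Int × Int) :=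
  if d + gap ≤ e then
    if i < drops.length - 1 ∧ e < drops.getD (i + 1) 0 then some (true, d, e)
    else if i = drops.length - 1 then some (true, d, e)
    else none
  else none

lemma innerA_eq_find (drops : List Int) (i : Nat) (d gap : Int) :
    ∀ incs : List Int, pvInnerA drops i d gap incs =
      match incs.find? (fun e => decide (d ≤ e)) with
      | some e => pvDecA drops i d gap e
      | none => none := by
  intro incs
  induction incs with
  | nil => rfl
  | cons e rest ih =>
    by_cases h : d ≤ e
    · simp [pvInnerA, h, pvDecA]
    · simp [pvInnerA, h, ih]

lemma absorb_fst (e : Int) : ∀ (remaining : List Int) (fge : PySem.Dict Int Int),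
    (pvAbsorbB e fge remaining).1 = remaining.dropWhile (fun t => decide (t ≤ e)) := by
  intro remaining
  induction remaining with
  | nil => intro fge; rfl
  | cons t ts ih =>
    intro fge
    by_cases h : t ≤ e
    · simp [pvAbsorbB, h, List.dropWhile, ih]
    · simp [pvAbsorbB, h, List.dropWhile]

lemma absorb_get? (e : Int) : ∀ (remaining : List Int) (fge : PySem.Dict Int Int) (k : Int),
    remaining.Pairwise (· < ·) →
    (pvAbsorbB e fge remaining).2.get? k =
      if k ∈ remaining ∧ k ≤ e then some e else fge.get? k := by
  intro remaining
  induction remaining with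
  | nil => intro fge k _; simp [pvAbsorbB]
  | cons t ts ih =>
    intro fge k hpw
    have hts : ts.Pairwise (· < ·) := hpw.tail
    have hlt : ∀ x ∈ ts, t < x := fun x hx => (List.pairwise_cons.mp hpw).1 x hx
    by_cases h : t ≤ e
    · rw [show pvAbsorbB e fge (t :: ts) = pvAbsorbB e (fge.insert t e) ts by simp [pvAbsorbB, h]]
      rw [ih (fge.insert t e) k hts]
      by_cases hk : k ∈ ts ∧ k ≤ e
      · rw [if_pos hk, if_pos ⟨List.mem_cons.mpr (Or.inr hk.1), hk.2⟩]
      · rw [if_neg hk]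
        by_cases hkt : k = t
        · subst hkt
          rw [if_pos ⟨List.mem_cons_self, h⟩]
          exact PySem.Dict.get?_insert_self _ _ _
        · have hne : ¬ (k ∈ t :: ts ∧ k ≤ e) := by
            rintro ⟨hm, hke⟩
            rcases List.mem_cons.mp hm with h1 | h1
            · exact hkt h1
            · exact hk ⟨h1, hke⟩
          rw [if_neg hne, PySem.Dict.get?_insert]
          rw [if_neg hkt]
    · rw [show pvAbsorbB e fge (t :: ts) = (t :: ts, fge) by simp [pvAbsorbB, h]]
      have hne : ¬ (k ∈ t :: ts ∧ k ≤ e) := by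
        rintro ⟨hm, hke⟩
        rcases List.mem_cons.mp hm with h1 | h1
        · exact h (h1 ▸ hke)
        · exact h (le_of_lt (lt_of_lt_of_le (hlt k h1) hke))
      rw [if_neg hne]

lemma dropWhile_gt (e : Int) : ∀ (l : List Int), l.Pairwise (· < ·) →
    ∀ x ∈ l.dropWhile (fun t => decide (t ≤ e)), e < x := by
  intro l
  induction l with
  | nil => intro _ x hx; simp [List.dropWhile] at hx
  | cons t ts ih =>
    intro hpw x hx
    by_cases h : t ≤ e
    · simp only [List.dropWhile, decide_eq_true h] at hx
      exact ih hpw.tail x hx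
    · simp only [List.dropWhile, decide_eq_false h] at hx
      rcases List.mem_cons.mp hx with h1 | h1
      · omega
      · exact lt_trans (by omega) ((List.pairwise_cons.mp hpw).1 x h1)

lemma mem_dropWhile_of_not (e : Int) : ∀ (l : List Int), ∀ x ∈ l, ¬ x ≤ e →
    x ∈ l.dropWhile (fun t => decide (t ≤ e)) := by
  intro l
  induction l with
  | nil => intro x hx; simp at hx
  | cons t ts ih =>
    intro x hx hxe
    by_cases h : t ≤ e
    · simp only [List.dropWhile, decide_eq_true h]
      rcases List.mem_cons.mp hx with h1 | h1
      · exact absurd (h1 ▸ h) hxe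
      · exact ih x h1 hxe
    · simpa only [List.dropWhile, decide_eq_false h] using hx

lemma sweep_spec : ∀ (incs remaining : List Int) (fge : PySem.Dict Int Int),
    remaining.Pairwise (· < ·) →
    (∀ t ∈ remaining, fge.get? t = none) →
    (∀ t ∈ remaining, (pvSweepB remaining fge incs).get? t = incs.find? (fun e => decide (t ≤ e)))
    ∧ (∀ k : Int, k ∉ remaining → (pvSweepB remaining fge incs).get? k = fge.get? k) := by
  intro incs
  induction incs with
  | nil =>
    intro remaining fge _ hnone
    exact ⟨fun t ht => by simp [pvSweepB, hnone t ht], fun k _ => rfl⟩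
  | cons e rest ih =>
    intro remaining fge hpw hnone
    by_cases hrem : remaining = []
    · subst hrem
      refine ⟨fun t ht => absurd ht (List.not_mem_nil), fun k _ => by simp [pvSweepB]⟩
    · rw [show pvSweepB remaining fge (e :: rest) =
          pvSweepB (pvAbsorbB e fge remaining).1 (pvAbsorbB e fge remaining).2 rest by
        simp [pvSweepB, hrem]]
      set rem' := (pvAbsorbB e fge remaining).1 with hrem'
      have hfst : rem' = remaining.dropWhile (fun t => decide (t ≤ e)) := absorb_fst e remaining fge
      have hsub : rem'.Sublist remaining := hfst ▸ List.dropWhile_sublist _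
      have hpw' : rem'.Pairwise (· < ·) := hpw.sublist hsub
      have hnone' : ∀ t ∈ rem', (pvAbsorbB e fge remaining).2.get? t = none := by
        intro t ht
        have hgt : e < t := dropWhile_gt e remaining hpw t (hfst ▸ ht)
        rw [absorb_get? e remaining fge t hpw]
        have : ¬ (t ∈ remaining ∧ t ≤ e) := fun ⟨_, h2⟩ => by omega
        simp [this]
        exact hnone t (hsub.mem ht)
      obtain ⟨ih1, ih2⟩ := ih rem' (pvAbsorbB e fge remaining).2 hpw' hnone'
      constructor
      · intro t ht
        by_cases hte : t ≤ e
        · have htnot : t ∉ rem' := by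
            intro hmem
            exact absurd (dropWhile_gt e remaining hpw t (hfst ▸ hmem)) (by omega)
          rw [ih2 t htnot, absorb_get? e remaining fge t hpw]
          simp [ht, hte]
        · have htin : t ∈ rem' := hfst ▸ mem_dropWhile_of_not e remaining t ht hte
          rw [ih1 t htin]
          simp [hte]
      · intro k hk
        have hknot : k ∉ rem' := fun hmem => hk (hsub.mem hmem)
        rw [ih2 k hknot, absorb_get? e remaining fge k hpw]
        have : ¬ (k ∈ remaining ∧ k ≤ e) := fun ⟨h1, _⟩ => hk h1
        simp [this]

lemma loop_eq (drops incs : List Int) (gap : Int) (fge : PySem.Dict Int Int)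
    (hf : ∀ d ∈ drops, fge.get? d = incs.find? (fun e => decide (d ≤ e))) :
    ∀ (rest : List Int) (k : Nat), drops.drop k = rest →
      pvOuterA drops incs gap (List.range' k rest.length) =
        pvScanB drops gap fge (PySem.List.enumerate rest (k : Int)) := by
  intro rest
  induction rest with
  | nil => intro k _; simp [pvOuterA, pvScanB, PySem.List.enumerate_nil]
  | cons d rest' ihr =>
    intro k hk
    have hklen : k < drops.length := by
      by_contra h
      rw [List.drop_eq_nil_of_le (by omega)] at hk
      exact List.cons_ne_nil d rest' hk.symm
    have hget : drops[k]? = some d := by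
      have h0 : (drops.drop k)[0]? = drops[k + 0]? := List.getElem?_drop
      rw [hk] at h0
      simpa using h0.symm
    have hgetD : drops.getD k 0 = d := by
      simp [List.getD, hget]
    have hdmem : d ∈ drops := by
      have : d ∈ drops.drop k := hk ▸ List.mem_cons_self
      exact List.mem_of_mem_drop this
    have hdrop' : drops.drop (k + 1) = rest' := by
      have : drops.drop (k + 1) = (drops.drop k).drop 1 := by
        rw [List.drop_drop]
      rw [this, hk]; rfl
    rw [show (d :: rest').length = rest'.length + 1 from rfl, List.range'_succ,
        PySem.List.enumerate_cons]
    show (match pvInnerA drops k (drops.getD k 0) gap incs with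
          | some r => r
          | none => pvOuterA drops incs gap (List.range' (k + 1) rest'.length)) = _
    rw [hgetD, innerA_eq_find]
    show _ = (match fge.get? d with
          | some e =>
            if d + gap ≤ e ∧ (((k : Int)) = (drops.length : Int) - 1 ∨
                e < drops.getD (((k : Int)) + 1).toNat 0) then (true, d, e)
            else pvScanB drops gap fge (PySem.List.enumerate rest' ((k : Int) + 1))
          | none => pvScanB drops gap fge (PySem.List.enumerate rest' ((k : Int) + 1)))
    rw [hf d hdmem]
    have hcast : ((k : Int) + 1) = ((k + 1 : Nat) : Int) := by push_cast; ring
    have hrec : pvOuterA drops incs gap (List.range' (k + 1) rest'.length) =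
        pvScanB drops gap fge (PySem.List.enumerate rest' ((k : Int) + 1)) := by
      rw [hcast]; exact ihr (k + 1) hdrop'
    cases hfind : incs.find? (fun e => decide (d ≤ e)) with
    | none => simpa using hrec
    | some e =>
      have htoNat : (((k : Int)) + 1).toNat = k + 1 := by omega
      rw [htoNat]
      show (match pvDecA drops k d gap e with
            | some r => r
            | none => pvOuterA drops incs gap (List.range' (k + 1) rest'.length)) =
          if d + gap ≤ e ∧ (((k : Int)) = (drops.length : Int) - 1 ∨ e < drops.getD (k + 1) 0)
          then (true, d, e)
          else pvScanB drops gap fge (PySem.List.enumerate rest' ((k : Int) + 1))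
      by_cases hgap : d + gap ≤ e
      · by_cases hlast : k = drops.length - 1
        · have h1 : ¬ (k < drops.length - 1 ∧ e < drops.getD (k + 1) 0) := fun hc => by omega
          have h2 : ((k : Int)) = (drops.length : Int) - 1 := by omega
          rw [show pvDecA drops k d gap e = some (true, d, e) from by
            unfold pvDecA; rw [if_pos hgap, if_neg h1, if_pos hlast]]
          rw [if_pos ⟨hgap, Or.inl h2⟩]
        · have h2 : ¬ (((k : Int)) = (drops.length : Int) - 1) := by omega
          by_cases hbetw : e < drops.getD (k + 1) 0
          · rw [show pvDecA drops k d gap e = some (true, d, e) from by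
              unfold pvDecA; rw [if_pos hgap, if_pos ⟨by omega, hbetw⟩]]
            rw [if_pos ⟨hgap, Or.inr hbetw⟩]
          · rw [show pvDecA drops k d gap e = none from by
              unfold pvDecA
              rw [if_pos hgap, if_neg (fun hc => hbetw hc.2), if_neg hlast]]
            rw [if_neg (by rintro ⟨-, h | h⟩; exacts [h2 h, hbetw h])]
            exact hrec
      · rw [show pvDecA drops k d gap e = none from if_neg hgap]
        rw [if_neg (fun hc => hgap hc.1)]
        exact hrec

lemma pairwise_lt_thresholds (drops : List Int) :
    (PySem.List.sorted (PySem.Set.ofList drops) (fun x => x) false).Pairwise (· < ·) := by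
  have hle : (PySem.List.sorted (PySem.Set.ofList drops) (fun x => x) false).Pairwise
      (fun a b => a ≤ b) := PySem.List.sorted_pairwise _ _
  have hnd : (PySem.List.sorted (PySem.Set.ofList drops) (fun x => x) false).Nodup :=
    (PySem.List.sorted_perm _ _ _).symm.nodup (PySem.Set.nodup_ofList drops)
  exact (hle.and hnd).imp (fun h => lt_of_le_of_ne h.1 h.2)

-- ===== VERDICT (by name: the statement is the Claim_ definition above) =====
theorem detectDoor_spec : Claim_equal_detectDoor := by
  intro drops incs gap rot _ _
  unfold Spec_detectDoor detectDoor detectDoor_alt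
  cases h1 : PySem.List.pyGet? drops (-1) with
  | none => cases h2 : PySem.List.pyGet? incs 0 <;> rfl
  | some dropIndex =>
    cases h2 : PySem.List.pyGet? incs 0 with
    | none => rfl
    | some increaseIndex =>
      dsimp only
      by_cases hc : dropIndex > increaseIndex ∧ dropIndex - rot + gap ≤ increaseIndex ∧
          (drops.length = 1 ∨ increaseIndex < drops.getD 0 0)
      · rw [if_pos hc, if_pos hc]
      · rw [if_neg hc, if_neg hc]
        have hf : ∀ d ∈ drops,
            (pvSweepB (PySem.List.sorted (PySem.Set.ofList drops) (fun x => x) false)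
              PySem.Dict.empty incs).get? d = incs.find? (fun e => decide (d ≤ e)) := by
          intro d hd
          have hmem : d ∈ PySem.List.sorted (PySem.Set.ofList drops) (fun x => x) false :=
            (PySem.List.mem_sorted _ _ _ _).mpr ((PySem.Set.mem_ofList _ _).mpr hd)
          exact (sweep_spec incs _ PySem.Dict.empty (pairwise_lt_thresholds drops)
            (fun t _ => PySem.Dict.get?_empty _)).1 d hmem
        have := loop_eq drops incs gap _ hf drops 0 (List.drop_zero)
        simpa [List.range_eq_range'] using this
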